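-- pv_equiv track=rewrite | github.com/PaulMineau/SOMA_Foundation | soma/autoresearcher/fetcher.py | _guess_s2_study_type
-- ===== SOURCE A (Python) =====
-- def _guess_s2_study_type(pub_types: list[str]) -> str:
--     """Map Semantic Scholar publication types to our taxonomy."""
--     types_lower = [pt.lower() for pt in pub_types]
--     if "review" in types_lower:
--         return "review"
--     if "casereport" in types_lower:
--         return "case"
--     if "journalarticle" in types_lower:
--         return "unknown"
--     return "unknown"
-- ===== SOURCE B (Python) =====
-- _LABELS = ("review", "case", "unknown")
--
-- def _guess_s2_study_type(pub_types: list[str]) -> str: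
--     """Map Semantic Scholar publication types to our taxonomy."""
--     best = 2
--     for pt in pub_types:
--         key = pt.lower()
--         if key == "review":
--             return _LABELS[0]
--         if key == "casereport":
--             best = 1
--     return _LABELS[best]
-- ===== Notes on version B (the rewrite author's own statement) =====
-- stated objective: alternative
-- what changed: Replaces the lowercased-copy list plus three separate membership scans with a single pass that lowercases each element once, returns immediately on 'review', and tracks a best-priority index into a label table.
import Mathlib
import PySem

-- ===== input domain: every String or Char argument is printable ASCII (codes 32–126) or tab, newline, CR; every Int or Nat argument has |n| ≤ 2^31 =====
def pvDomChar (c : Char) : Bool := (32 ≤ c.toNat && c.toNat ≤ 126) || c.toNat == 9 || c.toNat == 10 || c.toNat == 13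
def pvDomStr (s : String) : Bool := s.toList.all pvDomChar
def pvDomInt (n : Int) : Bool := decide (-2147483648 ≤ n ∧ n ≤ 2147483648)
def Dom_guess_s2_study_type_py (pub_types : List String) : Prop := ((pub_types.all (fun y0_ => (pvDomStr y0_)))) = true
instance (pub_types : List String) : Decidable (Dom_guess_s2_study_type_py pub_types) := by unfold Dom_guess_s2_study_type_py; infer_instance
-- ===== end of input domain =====

-- B replaces the lowercased-copy list and three membership scans with one pass
-- tracking a best-priority index into a label table (objective: alternative).


-- ===== PORT A =====
def guess_s2_study_type_py (pub_types : List String) : String :=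
  let types_lower := pub_types.map PySem.Str.lower
  if types_lower.contains "review" then "review"
  else if types_lower.contains "casereport" then "case"
  else if types_lower.contains "journalarticle" then "unknown"
  else "unknown"

-- ===== PORT B =====
def pvLabels : List String := ["review", "case", "unknown"]

def guessAltLoop : List String → Nat → Nat
  | [], best => best
  | pt :: rest, best =>
    let key := PySem.Str.lower pt
    if key = "review" then 0
    else guessAltLoop rest (if key = "casereport" then 1 else best)

def guess_s2_study_type_py_alt (pub_types : List String) : String :=
  pvLabels.getD (guessAltLoop pub_types 2) "unknown"

-- ===== PRECONDITION & SPEC =====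
def Spec_guess_s2_study_type_py (pub_types : List String) (out : String) : Prop := out = guess_s2_study_type_py_alt pub_types
instance (pub_types : List String) (out : String) : Decidable (Spec_guess_s2_study_type_py pub_types out) := by unfold Spec_guess_s2_study_type_py; infer_instance

-- ===== CLAIM (what is proved, stated in full; the proofs are below) =====
def Claim_equal_guess_s2_study_type_py : Prop := ∀ (pub_types : List String), Dom_guess_s2_study_type_py pub_types → Spec_guess_s2_study_type_py pub_types (guess_s2_study_type_py pub_types)

-- ===== LEMMAS AND PROOFS =====
theorem guessAltLoop_char (l : List String) (best : Nat) :
    guessAltLoop l best =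
      if (l.map PySem.Str.lower).contains "review" then 0
      else if (l.map PySem.Str.lower).contains "casereport" then 1
      else best := by
  induction l generalizing best with
  | nil => simp [guessAltLoop]
  | cons pt rest ih =>
    simp only [guessAltLoop, List.map_cons, List.contains_cons]
    by_cases h1 : PySem.Str.lower pt = "review"
    · simp [h1]
    · by_cases h2 : PySem.Str.lower pt = "casereport"
      · simp [h2, ih]
      · have e1 : ("review" == PySem.Str.lower pt) = false := by
          simp; exact fun h => h1 h.symm
        have e2 : ("casereport" == PySem.Str.lower pt) = false := by
          simp; exact fun h => h2 h.symm
        simp [h1, h2, e1, e2, ih]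

-- ===== VERDICT (by name: the statement is the Claim_ definition above) =====
theorem guess_s2_study_type_py_spec : Claim_equal_guess_s2_study_type_py := by
  intro pub_types _
  unfold Spec_guess_s2_study_type_py guess_s2_study_type_py guess_s2_study_type_py_alt
  rw [guessAltLoop_char]
  by_cases h1 : ∃ a ∈ pub_types, PySem.Str.lower a = "review"
  · simp [h1, pvLabels]
  · by_cases h2 : ∃ a ∈ pub_types, PySem.Str.lower a = "casereport"
    · simp [h1, h2, pvLabels]
    · by_cases h3 : ∃ a ∈ pub_types, PySem.Str.lower a = "journalarticle" <;>
        simp [h1, h2, h3, pvLabels]
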